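-- pv_equiv track=rewrite | github.com/HKJL10201/dapp-essential-functions-duplicate-check | dapp_analyzer.py | dapp_init
-- ===== SOURCE A (Python) =====
-- def dapp_init(file_list):
--     dapp_dic = {}
--     for f in file_list:
--         dirs = f.split('/')
--         idx = dirs[1]+'/'+dirs[2]  # combine index and name
--         if idx not in dapp_dic.keys():
--             dapp_dic[idx] = []
--         dapp_dic[idx].append(f)
--     return dapp_dic
-- ===== SOURCE B (Python) =====
-- def dapp_init(file_list):
--     # group-by via ordered distinct keys + one filter per key (no accumulating dict)
--     def key(f):
--         dirs = f.split('/')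
--         return dirs[1] + '/' + dirs[2]
--     keys = list(dict.fromkeys(map(key, file_list)))
--     return {k: [f for f in file_list if key(f) == k] for k in keys}
-- ===== Notes on version B (the rewrite author's own statement) =====
-- stated objective: alternative
-- what changed: Replaces A's single accumulate-into-dict loop with a two-phase strategy: compute the ordered distinct dir[1]/dir[2] keys via dict.fromkeys, then build each group with a per-key filter comprehension.
import Mathlib
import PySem

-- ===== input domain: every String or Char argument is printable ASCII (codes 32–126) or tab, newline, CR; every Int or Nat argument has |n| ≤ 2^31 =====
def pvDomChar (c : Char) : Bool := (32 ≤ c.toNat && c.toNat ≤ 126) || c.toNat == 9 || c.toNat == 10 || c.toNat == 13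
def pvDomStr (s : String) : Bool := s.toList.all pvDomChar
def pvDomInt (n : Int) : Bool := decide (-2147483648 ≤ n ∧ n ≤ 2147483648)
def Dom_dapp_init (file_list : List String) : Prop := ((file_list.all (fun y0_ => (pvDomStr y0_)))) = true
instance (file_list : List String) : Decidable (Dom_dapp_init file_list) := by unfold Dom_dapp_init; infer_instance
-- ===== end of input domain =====

-- B groups by the dir[1]/dir[2] key via ordered distinct keys + one filter per key instead of A's accumulating dict; return value proved equal on Pre_.

-- ===== PORT A =====
def dapp_init (file_list : List String) : List (String × List String) :=
  (file_list.foldl (fun dapp_dic f =>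
      let dirs := (PySem.Str.split? f "/").getD []   -- sep "/" ≠ "", so split? is always some
      let idx := PySem.List.pyGetD dirs 1 "" ++ "/" ++ PySem.List.pyGetD dirs 2 ""
      let dapp_dic := if dapp_dic.contains idx then dapp_dic else dapp_dic.insert idx []
      dapp_dic.modify idx [] (fun v => v ++ [f]))
    PySem.Dict.empty).items

-- ===== PORT B =====
def pvKey (f : String) : String :=
  let dirs := (PySem.Str.split? f "/").getD []   -- sep "/" ≠ "", so split? is always some
  PySem.List.pyGetD dirs 1 "" ++ "/" ++ PySem.List.pyGetD dirs 2 ""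

def dapp_init_alt (file_list : List String) : List (String × List String) :=
  (PySem.List.dedup (file_list.map pvKey)).map
    (fun k => (k, file_list.filter (fun f => pvKey f == k)))

-- ===== PRECONDITION & SPEC =====
-- Pre_ excludes exactly the inputs on which the Python A raises IndexError: a path with fewer than three '/'-separated components.
def Pre_dapp_init (file_list : List String) : Prop :=
  ∀ f ∈ file_list, 3 ≤ ((PySem.Str.split? f "/").getD []).length
instance (file_list : List String) : Decidable (Pre_dapp_init file_list) := by unfold Pre_dapp_init; infer_instance
def pvWitness_dapp_init : List String := ["./dir1/app1/main.py", "./dir1/app2/x.py", "./dir1/app1/util.py"]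

def Spec_dapp_init (file_list : List String) (out : List (String × List String)) : Prop := out = dapp_init_alt file_list
instance (file_list : List String) (out : List (String × List String)) : Decidable (Spec_dapp_init file_list out) := by unfold Spec_dapp_init; infer_instance

-- ===== CLAIM (what is proved, stated in full; the proofs are below) =====
def Claim_equal_dapp_init : Prop := ∀ (file_list : List String), Dom_dapp_init file_list → Pre_dapp_init file_list → Spec_dapp_init file_list (dapp_init file_list)

-- ===== LEMMAS AND PROOFS =====

-- A's conditional "insert [] then append" step is extensionally a single modify step.
theorem dapp_step_eq_modify (d : PySem.Dict String (List String)) (k : String) (f : String) :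
    (if d.contains k then d else d.insert k []).modify k [] (fun v => v ++ [f])
      = d.modify k [] (fun v => v ++ [f]) := by
  by_cases h : d.contains k = true
  · simp [h]
  · simp only [PySem.Dict.modify]
    rw [if_neg h, PySem.Dict.getD_insert_self, PySem.Dict.insert_insert_self,
      PySem.Dict.getD_of_not_contains d [] (by simpa using h)]

-- A's whole loop is the canonical modify-fold keyed by pvKey.
theorem dapp_init_eq_modify_fold (file_list : List String) :
    dapp_init file_list
      = (file_list.foldl (fun d f => d.modify (pvKey f) [] (fun v => v ++ [f]))
          PySem.Dict.empty).items := by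
  unfold dapp_init
  congr 1
  apply List.foldl_ext
  intro d f _
  exact dapp_step_eq_modify d (pvKey f) f

-- ===== VERDICT (by name: the statement is the Claim_ definition above) =====
theorem dapp_init_spec : Claim_equal_dapp_init := by
  intro file_list _ _
  unfold Spec_dapp_init dapp_init_alt
  rw [dapp_init_eq_modify_fold]
  have hnd : (file_list.foldl (fun d f => d.modify (pvKey f) [] (fun v => v ++ [f]))
      PySem.Dict.empty).keys.Nodup :=
    PySem.Dict.nodup_keys_foldl_modify_key file_list pvKey [] (fun _ f v => v ++ [f])
      PySem.Dict.empty (by simp [PySem.Dict.keys_empty])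
  rw [PySem.Dict.items_eq_map_keys _ hnd []]
  rw [PySem.Dict.keys_foldl_modify_key file_list pvKey [] (fun _ f v => v ++ [f])]
  have hkeys : PySem.Set.update (PySem.Dict.keys (PySem.Dict.empty (κ := String) (ν := List String)))
      (file_list.map pvKey) = PySem.List.dedup (file_list.map pvKey) := by
    simp [PySem.List.dedup_eq_ofList, PySem.Set.update, PySem.Set.ofList,
      PySem.Dict.keys_empty, PySem.Set.empty]
  rw [hkeys]
  apply List.map_congr_left
  intro k _
  have hfold : file_list.foldl (fun d f => d.modify (pvKey f) [] (fun v => v ++ [f]))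
        PySem.Dict.empty
      = (file_list.map (fun f => (pvKey f, f))).foldl
          (fun d p => d.modify p.1 [] (fun v => v ++ [p.2])) PySem.Dict.empty := by
    rw [List.foldl_map]
  rw [hfold, PySem.Dict.getD_foldl_modify_append, PySem.Dict.getD_empty]
  simp [List.filter_map, Function.comp_def]
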